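-- pv_equiv track=rewrite | github.com/crypsis3301/Jones-m-triviality | JVP.py | _power_table_y
-- ===== SOURCE A (Python) =====
-- from collections import defaultdict
--
-- def _poly_add(A, B):
--     out = defaultdict(int)
--     for d,c in A.items():
--         out[d] += c
--     for d,c in B.items():
--         out[d] += c
--     return {d:c for d,c in out.items() if c != 0}
--
-- def _poly_scalar_mul(A, k):
--     if k == 0: return {}
--     return {d: k*c for d,c in A.items()}
--
-- def _poly_mul_p(A):
--     return {d+1: c for d,c in A.items()}
--
-- def _mul_by_y(A, B):
--     # y*(A + B x) = (x - p)*(A + B x) = (B - p A) + A x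
--     return (_poly_add(B, _poly_scalar_mul(_poly_mul_p(A), -1)), A)
--
-- def _power_table_y(n):
--     """List [(A_0,B_0),...,(A_n,B_n)] with y^k = A_k + B_k x, where y = x - p."""
--     T = [({0:1}, {})]                  # k=0: 1
--     if n == 0: return T
--     A, B = {1:-1}, {0:1}               # k=1: y = -p + x
--     T.append((A,B))
--     for _ in range(2, n+1):
--         A, B = _mul_by_y(A, B)
--         T.append((A,B))
--     return T
-- ===== SOURCE B (Python) =====
-- def _row(k):
--     # A_k = (-1)^k * sum_{d = k mod 2, d+2, ..., k} C((k+d)//2, d) * p^d, ascending degree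
--     sign = -1 if k % 2 else 1
--     d = k % 2
--     m = (k + d) // 2
--     c = m if d else 1          # C(m, d) for d in {0, 1}
--     out = {}
--     while d <= k:
--         out[d] = sign * c
--         c = c * (m + 1) * (m - d) // ((d + 1) * (d + 2))
--         d += 2
--         m += 1
--     return out
--
-- def _power_table_y(n):
--     """List [(A_0,B_0),...,(A_n,B_n)] with y^k = A_k + B_k x, where y = x - p."""
--     table = [({0: 1}, {})]
--     if n == 0:
--         return table
--     prev = {1: -1}
--     table.append((prev, {0: 1}))
--     for k in range(2, n + 1):
--         cur = _row(k)
--         table.append((cur, prev))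
--         prev = cur
--     return table
-- ===== Notes on version B (the rewrite author's own statement) =====
-- stated objective: alternative
-- what changed: A builds each table row by symbolically multiplying the previous row by y, with three dict-merging helper passes per step; B writes each row directly from its closed form (the coefficient of each power of p in A_k is a signed binomial coefficient) via an incremental product recurrence, keeping only the previous row for the B-component.
import Mathlib
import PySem

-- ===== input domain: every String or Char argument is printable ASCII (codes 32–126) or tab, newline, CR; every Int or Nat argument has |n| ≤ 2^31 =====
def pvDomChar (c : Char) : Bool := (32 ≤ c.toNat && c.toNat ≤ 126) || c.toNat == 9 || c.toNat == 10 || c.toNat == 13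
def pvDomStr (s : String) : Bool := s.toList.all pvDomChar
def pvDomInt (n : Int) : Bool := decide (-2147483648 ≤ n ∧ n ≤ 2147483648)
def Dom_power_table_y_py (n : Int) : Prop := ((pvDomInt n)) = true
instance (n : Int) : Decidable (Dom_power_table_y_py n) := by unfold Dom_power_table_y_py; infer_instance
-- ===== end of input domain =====

-- B replaces A's repeated symbolic polynomial multiplication by y with the
-- closed form of each row (signed binomial coefficients), generated by an
-- incremental binomial recurrence (objective: alternative algorithm, same cost).

-- ===== PORT A =====
-- polynomials {degree: coeff} are PySem.Dict Int Int; the table unwraps them to items lists (the type convention)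
def polyAdd (A B : PySem.Dict Int Int) : PySem.Dict Int Int :=
  let out := A.items.foldl (fun o p => o.insert p.1 (o.getD p.1 0 + p.2)) PySem.Dict.empty
  let out := B.items.foldl (fun o p => o.insert p.1 (o.getD p.1 0 + p.2)) out
  PySem.Dict.mk (out.items.filter (fun p => p.2 != 0))

def polyScalarMul (A : PySem.Dict Int Int) (k : Int) : PySem.Dict Int Int :=
  if k = 0 then PySem.Dict.empty
  else PySem.Dict.mk (A.items.map (fun p => (p.1, k * p.2)))

def polyMulP (A : PySem.Dict Int Int) : PySem.Dict Int Int :=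
  PySem.Dict.mk (A.items.map (fun p => (p.1 + 1, p.2)))

def mulByY (A B : PySem.Dict Int Int) : PySem.Dict Int Int × PySem.Dict Int Int :=
  (polyAdd B (polyScalarMul (polyMulP A) (-1)), A)

def power_table_y_py (n : Int) : List ((List (Int × Int)) × (List (Int × Int))) :=
  let T : List (PySem.Dict Int Int × PySem.Dict Int Int) :=
    [(PySem.Dict.mk [((0 : Int), (1 : Int))], PySem.Dict.empty)]
  if n = 0 then T.map (fun p => (p.1.items, p.2.items))
  else
    let A := PySem.Dict.mk [((1 : Int), (-1 : Int))]
    let B := PySem.Dict.mk [((0 : Int), (1 : Int))]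
    let T := T ++ [(A, B)]
    let s := (PySem.List.pyRange 2 (n+1) 1).foldl
      (fun (st : PySem.Dict Int Int × PySem.Dict Int Int ×
                 List (PySem.Dict Int Int × PySem.Dict Int Int)) _ =>
        let AB := mulByY st.1 st.2.1
        (AB.1, AB.2, st.2.2 ++ [AB])) (A, B, T)
    s.2.2.map (fun p => (p.1.items, p.2.items))

-- ===== PORT B =====
-- while d <= k: out[d] = sign*c; c = c*(m+1)*(m-d)//((d+1)*(d+2)); d += 2; m += 1
def rowAux (k sign d m c : Int) (out : PySem.Dict Int Int) : PySem.Dict Int Int :=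
  if _h : d ≤ k then
    rowAux k sign (d+2) (m+1)
      (PySem.Int.floordiv (c * (m+1) * (m-d)) ((d+1) * (d+2)))
      (out.insert d (sign * c))
  else out
termination_by (k + 2 - d).toNat
decreasing_by omega

def pyRow (k : Int) : PySem.Dict Int Int :=
  let sign : Int := if PySem.Int.mod k 2 ≠ 0 then -1 else 1
  let d := PySem.Int.mod k 2
  let m := PySem.Int.floordiv (k + d) 2
  let c := if d ≠ 0 then m else 1
  rowAux k sign d m c PySem.Dict.empty

def power_table_y_py_alt (n : Int) : List ((List (Int × Int)) × (List (Int × Int))) :=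
  let table : List (PySem.Dict Int Int × PySem.Dict Int Int) :=
    [(PySem.Dict.mk [((0 : Int), (1 : Int))], PySem.Dict.empty)]
  if n = 0 then table.map (fun p => (p.1.items, p.2.items))
  else
    let prev := PySem.Dict.mk [((1 : Int), (-1 : Int))]
    let table := table ++ [(prev, PySem.Dict.mk [((0 : Int), (1 : Int))])]
    let s := (PySem.List.pyRange 2 (n+1) 1).foldl
      (fun (st : PySem.Dict Int Int ×
                 List (PySem.Dict Int Int × PySem.Dict Int Int)) k =>
        let cur := pyRow k
        (cur, st.2 ++ [(cur, st.1)])) (prev, table)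
    s.2.map (fun p => (p.1.items, p.2.items))

-- ===== PRECONDITION & SPEC =====
def Spec_power_table_y_py (n : Int) (out : List ((List (Int × Int)) × (List (Int × Int)))) : Prop := out = power_table_y_py_alt n
instance (n : Int) (out : List ((List (Int × Int)) × (List (Int × Int)))) : Decidable (Spec_power_table_y_py n out) := by unfold Spec_power_table_y_py; infer_instance

-- ===== CLAIM (what is proved, stated in full; the proofs are below) =====
def Claim_equal_power_table_y_py : Prop := ∀ (n : Int), Dom_power_table_y_py n → Spec_power_table_y_py n (power_table_y_py n)

-- ===== LEMMAS AND PROOFS =====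

def erow (j : Nat) : List (Int × Int) :=
  (List.range (j+1)).map (fun i => (((2*i : Nat) : Int), ((Nat.choose (j+i) (2*i)) : Int)))
def orow (j : Nat) : List (Int × Int) :=
  (List.range (j+1)).map (fun i => (((2*i+1 : Nat) : Int), -((Nat.choose (j+1+i) (2*i+1)) : Int)))

def mrow (k : Nat) : List (Int × Int) := if k % 2 = 0 then erow (k/2) else orow (k/2)

lemma mrow_two_mul (j : Nat) : mrow (2*j) = erow j := by
  simp [mrow, Nat.mul_mod_right]
lemma mrow_two_mul_add_one (j : Nat) : mrow (2*j+1) = orow j := by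
  simp [mrow, Nat.mul_add_div]

def prow (k : Nat) : List (Int × Int) := match k with | 0 => [] | k+1 => mrow k
def tblD (m : Nat) : List (PySem.Dict Int Int × PySem.Dict Int Int) :=
  (List.range (m+1)).map (fun t => (PySem.Dict.mk (mrow t), PySem.Dict.mk (prow t)))

lemma tblD_succ (m : Nat) :
    tblD (m+1) = tblD m ++ [(PySem.Dict.mk (mrow (m+1)), PySem.Dict.mk (mrow m))] := by
  unfold tblD
  rw [List.range_succ, List.map_append]
  rfl

lemma nodup_map_cast (n : Nat) (f : Nat → Nat) (hf : StrictMono f) :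
    ((List.range n).map (fun i => ((f i : Nat) : Int))).Nodup := by
  apply List.Nodup.map _ (List.nodup_range)
  intro a b h
  simp only at h
  exact hf.injective (by exact_mod_cast h)

lemma items_fold_fresh (L : List (Int × Int)) (acc : PySem.Dict Int Int)
    (hnd : (L.map Prod.fst).Nodup) (hfresh : ∀ p ∈ L, acc.contains p.1 = false) :
    L.foldl (fun o p => o.insert p.1 (o.getD p.1 0 + p.2)) acc = PySem.Dict.mk (acc.items ++ L) := by
  induction L generalizing acc with
  | nil => cases acc; simp
  | cons p L ih =>
    simp only [List.foldl_cons]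
    have hc : acc.contains p.1 = false := hfresh p (by simp)
    rw [PySem.Dict.getD_of_not_contains _ _ hc, zero_add]
    rw [ih (acc.insert p.1 p.2) (by simpa using hnd.of_cons) ?_]
    · congr 1
      rw [PySem.Dict.items_insert, hc]
      simp
    · intro q hq
      rw [PySem.Dict.contains_insert]
      have h1 : (q.1 == p.1) = false := by
        simp only [List.map_cons, List.nodup_cons] at hnd
        have : q.1 ∈ L.map Prod.fst := List.mem_map_of_mem hq
        simp only [beq_eq_false_iff_ne, ne_eq]
        intro h; exact hnd.1 (h ▸ this)
      rw [h1, hfresh q (by simp [hq])]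
      rfl

lemma items_fold_present (L : List (Int × Int)) (acc : PySem.Dict Int Int)
    (hndL : (L.map Prod.fst).Nodup) (hnd : acc.keys.Nodup)
    (hsub : ∀ p ∈ L, acc.contains p.1 = true) :
    (L.foldl (fun o p => o.insert p.1 (o.getD p.1 0 + p.2)) acc).items
      = acc.items.map (fun q => (q.1, q.2 + (PySem.Dict.mk L).getD q.1 0)) := by
  induction L generalizing acc with
  | nil =>
    have h0 : ∀ q : Int × Int, (PySem.Dict.mk ([] : List (Int × Int))).getD q.1 0 = 0 := fun q =>
      PySem.Dict.getD_empty q.1 0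
    simp only [List.foldl_nil, h0, add_zero]
    exact (List.map_id'' (fun q => rfl) acc.items).symm
  | cons p L ih =>
    obtain ⟨p1, p2⟩ := p
    simp only [List.foldl_cons]
    have hc : acc.contains p1 = true := hsub (p1, p2) (by simp)
    have hkeys : (acc.insert p1 (acc.getD p1 0 + p2)).keys = acc.keys :=
      PySem.Dict.keys_insert_of_contains _ _ hc
    simp only [List.map_cons, List.nodup_cons] at hndL
    rw [ih (acc.insert p1 (acc.getD p1 0 + p2)) hndL.2 (hkeys ▸ hnd)
          (by intro q hq
              rw [PySem.Dict.contains_insert]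
              rw [hsub q (by simp [hq])]; simp)]
    rw [PySem.Dict.items_insert, if_pos hc, List.map_map]
    apply List.map_congr_left
    intro q hq
    by_cases hqp : q.1 = p1
    · have hb : (q.1 == p1) = true := beq_iff_eq.mpr hqp
      have hgd : acc.getD p1 0 = q.2 := by
        rw [← hqp]
        exact PySem.Dict.getD_of_mem_items acc (by exact hq) hnd 0
      have hL0 : (PySem.Dict.mk L).getD p1 0 = 0 := by
        apply PySem.Dict.getD_of_not_contains
        rw [PySem.Dict.contains_eq_decide_mem_keys, PySem.Dict.keys_mk]
        simpa using hndL.1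
      have hPL : (PySem.Dict.mk ((p1, p2) :: L)).getD p1 0 = p2 := by
        rw [PySem.Dict.getD_eq_get?_getD, PySem.Dict.get?_mk_cons]
        simp
      simp [hqp, hL0, hPL, ← hgd]
    · have hb : (q.1 == p1) = false := beq_eq_false_iff_ne.mpr hqp
      have hPL : (PySem.Dict.mk ((p1, p2) :: L)).getD q.1 0 = (PySem.Dict.mk L).getD q.1 0 := by
        rw [PySem.Dict.getD_eq_get?_getD, PySem.Dict.getD_eq_get?_getD, PySem.Dict.get?_mk_cons]
        rw [show (p1 == q.1) = false from beq_eq_false_iff_ne.mpr (Ne.symm hqp)]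
        simp
      simp [hqp, hPL]

lemma filter_ne_zero_of_all (L : List (Int × Int)) (h : ∀ p ∈ L, p.2 ≠ 0) :
    L.filter (fun p => p.2 != 0) = L := by
  apply List.filter_eq_self.mpr
  intro p hp
  simpa using h p hp

lemma stepE (j : Nat) :
    polyAdd (PySem.Dict.mk (erow j)) (polyScalarMul (polyMulP (PySem.Dict.mk (orow j))) (-1))
      = PySem.Dict.mk (erow (j+1)) := by
  have hX : (polyScalarMul (polyMulP (PySem.Dict.mk (orow j))) (-1)) =
      PySem.Dict.mk ((List.range (j+1)).map (fun i => (((2*i+2 : Nat) : Int), ((Nat.choose (j+1+i) (2*i+1)) : Int)))) := by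
    simp only [polyScalarMul, polyMulP, orow]
    rw [if_neg (by norm_num)]
    congr 1
    show (((List.range (j+1)).map _).map _).map _ = _
    simp only [List.map_map]
    apply List.map_congr_left
    intro i _
    simp only [Function.comp]
    apply Prod.ext
    · push_cast; ring
    · push_cast; ring
  rw [hX]
  show PySem.Dict.mk _ = _
  -- keys facts
  have hndE : ((erow j).map Prod.fst).Nodup := by
    simp only [erow, List.map_map]
    exact nodup_map_cast _ (fun i => 2*i) (by intro a b h; dsimp only; omega)
  have hf1 := items_fold_fresh (erow j) PySem.Dict.empty hndE
    (fun p _ => PySem.Dict.contains_empty p.1)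
  -- split the X list
  set g : Nat → Int × Int := fun i => (((2*i+2 : Nat) : Int), ((Nat.choose (j+1+i) (2*i+1)) : Int)) with hg
  have hsplit : (List.range (j+1)).map g = (List.range j).map g ++ [g j] := by
    rw [List.range_succ, List.map_append]; rfl
  rw [hsplit, List.foldl_append]
  have hndXold : (((List.range j).map g).map Prod.fst).Nodup := by
    simp only [List.map_map, hg]
    exact nodup_map_cast _ (fun i => 2*i+2) (by intro a b h; dsimp only; omega)
  have hmid0 := items_fold_present ((List.range j).map g)
      (PySem.Dict.mk (erow j))
      hndXold (by rw [PySem.Dict.keys_mk]; exact hndE)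
      (by intro p hp
          obtain ⟨i, hi, rfl⟩ := List.mem_map.mp hp
          have hi' := List.mem_range.mp hi
          rw [PySem.Dict.contains_eq_decide_mem_keys, PySem.Dict.keys_mk]
          simp only [decide_eq_true_eq, erow, List.map_map]
          refine List.mem_map.mpr ⟨i+1, List.mem_range.mpr (by omega), ?_⟩
          simp only [Function.comp, hg]
          norm_num; ring)
  -- replace first fold by mk (erow j)
  rw [show (erow j).foldl (fun o p => o.insert p.1 (o.getD p.1 0 + p.2)) PySem.Dict.empty
        = PySem.Dict.mk (erow j) from by rw [hf1]; rfl] at *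
  set mid := ((List.range j).map g).foldl (fun o p => o.insert p.1 (o.getD p.1 0 + p.2)) (PySem.Dict.mk (erow j)) with hmiddef
  have hmid : mid.items = (List.range (j+1)).map
      (fun i => (((2*i : Nat) : Int), ((Nat.choose (j+1+i) (2*i)) : Int))) := by
    rw [hmid0]
    simp only [erow, List.map_map]
    apply List.map_congr_left
    intro i hi
    have hi' := List.mem_range.mp hi
    simp only [Function.comp]
    apply Prod.ext
    · rfl
    · show ((Nat.choose (j+i) (2*i) : Nat) : Int) + _ = _
      match i with
      | 0 =>
        have hnc : (PySem.Dict.mk ((List.range j).map g)).getD ((2*0 : Nat) : Int) 0 = 0 := by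
          apply PySem.Dict.getD_of_not_contains
          rw [PySem.Dict.contains_eq_decide_mem_keys, PySem.Dict.keys_mk]
          simp only [List.map_map, decide_eq_false_iff_not]
          intro hmem
          obtain ⟨a, _, ha⟩ := List.mem_map.mp hmem
          simp only [Function.comp, hg] at ha
          exact absurd (by exact_mod_cast ha) (by omega)
        rw [hnc]
        norm_num
      | i'+1 =>
        have hmem : (((2*(i'+1) : Nat) : Int), ((Nat.choose (j+1+i') (2*i'+1) : Nat) : Int))
            ∈ (List.range j).map g := by
          refine List.mem_map.mpr ⟨i', List.mem_range.mpr (by omega), ?_⟩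
          simp only [hg]
          apply Prod.ext
          · norm_num; ring
          · rfl
        have hnd' : (PySem.Dict.mk ((List.range j).map g)).keys.Nodup := by
          rw [PySem.Dict.keys_mk]; exact hndXold
        rw [PySem.Dict.getD_of_mem_items _ hmem hnd']
        have hp := Nat.choose_succ_succ (j+i'+1) (2*i'+1)
        have e1 : j+(i'+1) = j+i'+1 := by omega
        have e2 : 2*(i'+1) = 2*i'+1+1 := by omega
        have e3 : j+1+(i'+1) = j+i'+1+1 := by omega
        have e4 : j+1+i' = j+i'+1 := by omega
        rw [e1, e2, e3, e4]
        push_cast [hp]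
        ring
  rw [List.foldl_cons, List.foldl_nil]
  have hlast_nc : mid.contains (g j).1 = false := by
    rw [PySem.Dict.contains_eq_decide_mem_keys]
    simp only [PySem.Dict.keys, hmid, List.map_map, decide_eq_false_iff_not]
    intro hmem
    obtain ⟨a, ha', ha⟩ := List.mem_map.mp hmem
    simp only [Function.comp, hg] at ha
    have ha2 : 2*a = 2*j+2 := by exact_mod_cast ha
    have ha3 := List.mem_range.mp ha'
    omega
  rw [PySem.Dict.getD_of_not_contains _ _ hlast_nc, zero_add, PySem.Dict.items_insert, hlast_nc]
  simp only [Bool.false_eq_true, if_false]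
  rw [hmid]
  have htarget : erow (j+1) = (List.range (j+1)).map
      (fun i => (((2*i : Nat) : Int), ((Nat.choose (j+1+i) (2*i)) : Int)))
      ++ [(((2*j+2 : Nat) : Int), ((Nat.choose (2*j+1) (2*j+1) : Nat) : Int))] := by
    rw [erow, List.range_succ, List.map_append]
    congr 1
    simp only [List.map_cons, List.map_nil]
    rw [show j+1+(j+1) = 2*(j+1) from by omega, Nat.choose_self, Nat.choose_self]
    norm_num
    omega
  rw [filter_ne_zero_of_all _ ?_]
  · congr 1
    rw [htarget, hg]
    simp only []
    rw [show j+1+j = 2*j+1 from by omega]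
  · intro p hp
    rcases List.mem_append.mp hp with h1 | h2
    · obtain ⟨i, hi, rfl⟩ := List.mem_map.mp h1
      have hi' := List.mem_range.mp hi
      simp only [ne_eq, Int.natCast_eq_zero]
      exact (Nat.choose_pos (by omega)).ne'
    · simp only [List.mem_singleton] at h2
      subst h2
      simp only [hg, ne_eq, Int.natCast_eq_zero]
      exact (Nat.choose_pos (by omega)).ne'

lemma stepO (j : Nat) :
    polyAdd (PySem.Dict.mk (orow j)) (polyScalarMul (polyMulP (PySem.Dict.mk (erow (j+1)))) (-1))
      = PySem.Dict.mk (orow (j+1)) := by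
  have hX : (polyScalarMul (polyMulP (PySem.Dict.mk (erow (j+1)))) (-1)) =
      PySem.Dict.mk ((List.range (j+2)).map (fun i => (((2*i+1 : Nat) : Int), -((Nat.choose (j+1+i) (2*i)) : Int)))) := by
    simp only [polyScalarMul, polyMulP, erow]
    rw [if_neg (by norm_num)]
    congr 1
    show (((List.range (j+2)).map _).map _).map _ = _
    simp only [List.map_map]
    apply List.map_congr_left
    intro i _
    simp only [Function.comp]
    apply Prod.ext
    · push_cast; ring
    · push_cast; ring
  rw [hX]
  show PySem.Dict.mk _ = _
  have hndO : ((orow j).map Prod.fst).Nodup := by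
    simp only [orow, List.map_map]
    exact nodup_map_cast _ (fun i => 2*i+1) (by intro a b h; dsimp only; omega)
  have hf1 := items_fold_fresh (orow j) PySem.Dict.empty hndO
    (fun p _ => PySem.Dict.contains_empty p.1)
  set g : Nat → Int × Int := fun i => (((2*i+1 : Nat) : Int), -((Nat.choose (j+1+i) (2*i)) : Int)) with hg
  have hsplit : (List.range (j+2)).map g = (List.range (j+1)).map g ++ [g (j+1)] := by
    rw [List.range_succ, List.map_append]; rfl
  rw [hsplit, List.foldl_append]
  have hndXold : (((List.range (j+1)).map g).map Prod.fst).Nodup := by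
    simp only [List.map_map, hg]
    exact nodup_map_cast _ (fun i => 2*i+1) (by intro a b h; dsimp only; omega)
  have hmid0 := items_fold_present ((List.range (j+1)).map g)
      (PySem.Dict.mk (orow j))
      hndXold (by rw [PySem.Dict.keys_mk]; exact hndO)
      (by intro p hp
          obtain ⟨i, hi, rfl⟩ := List.mem_map.mp hp
          have hi' := List.mem_range.mp hi
          rw [PySem.Dict.contains_eq_decide_mem_keys, PySem.Dict.keys_mk]
          simp only [decide_eq_true_eq, orow, List.map_map]
          refine List.mem_map.mpr ⟨i, List.mem_range.mpr (by omega), ?_⟩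
          simp only [Function.comp, hg])
  rw [show (orow j).foldl (fun o p => o.insert p.1 (o.getD p.1 0 + p.2)) PySem.Dict.empty
        = PySem.Dict.mk (orow j) from by rw [hf1]; rfl] at *
  set mid := ((List.range (j+1)).map g).foldl (fun o p => o.insert p.1 (o.getD p.1 0 + p.2)) (PySem.Dict.mk (orow j)) with hmiddef
  have hmid : mid.items = (List.range (j+1)).map
      (fun i => (((2*i+1 : Nat) : Int), -((Nat.choose (j+2+i) (2*i+1)) : Int))) := by
    rw [hmid0]
    simp only [orow, List.map_map]
    apply List.map_congr_left
    intro i hi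
    have hi' := List.mem_range.mp hi
    simp only [Function.comp]
    apply Prod.ext
    · rfl
    · show -((Nat.choose (j+1+i) (2*i+1) : Nat) : Int) + _ = _
      have hmem : (((2*i+1 : Nat) : Int), -((Nat.choose (j+1+i) (2*i) : Nat) : Int))
          ∈ (List.range (j+1)).map g := by
        refine List.mem_map.mpr ⟨i, List.mem_range.mpr (by omega), ?_⟩
        simp only [hg]
      have hnd' : (PySem.Dict.mk ((List.range (j+1)).map g)).keys.Nodup := by
        rw [PySem.Dict.keys_mk]; exact hndXold
      rw [PySem.Dict.getD_of_mem_items _ hmem hnd']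
      have hp := Nat.choose_succ_succ (j+1+i) (2*i)
      rw [show j+2+i = j+1+i+1 from by omega, show 2*i+1 = 2*i+1 from rfl]
      push_cast [hp]
      ring
  rw [List.foldl_cons, List.foldl_nil]
  have hlast_nc : mid.contains (g (j+1)).1 = false := by
    rw [PySem.Dict.contains_eq_decide_mem_keys]
    simp only [PySem.Dict.keys, hmid, List.map_map, decide_eq_false_iff_not]
    intro hmem
    obtain ⟨a, ha', ha⟩ := List.mem_map.mp hmem
    simp only [Function.comp, hg] at ha
    have ha2 : 2*a+1 = 2*(j+1)+1 := by exact_mod_cast ha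
    have ha3 := List.mem_range.mp ha'
    omega
  rw [PySem.Dict.getD_of_not_contains _ _ hlast_nc, zero_add, PySem.Dict.items_insert, hlast_nc]
  simp only [Bool.false_eq_true, if_false]
  rw [hmid]
  have htarget : orow (j+1) = (List.range (j+1)).map
      (fun i => (((2*i+1 : Nat) : Int), -((Nat.choose (j+2+i) (2*i+1)) : Int)))
      ++ [(((2*(j+1)+1 : Nat) : Int), -((Nat.choose (j+1+(j+1)) (2*(j+1)) : Nat) : Int))] := by
    rw [orow, List.range_succ, List.map_append]
    refine congrArg₂ (· ++ ·) ?_ ?_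
    · apply List.map_congr_left
      intro i _
      rw [show j+1+1+i = j+2+i from by omega]
    · simp only [List.map_cons, List.map_nil]
      rw [show j+1+1+(j+1) = 2*(j+1)+1 from by omega, Nat.choose_self,
          show j+1+(j+1) = 2*(j+1) from by omega, Nat.choose_self]
  rw [filter_ne_zero_of_all _ ?_]
  · congr 1
    rw [htarget, hg]
  · intro p hp
    rcases List.mem_append.mp hp with h1 | h2
    · obtain ⟨i, hi, rfl⟩ := List.mem_map.mp h1
      have hi' := List.mem_range.mp hi
      simp only [ne_eq, neg_eq_zero, Int.natCast_eq_zero]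
      exact (Nat.choose_pos (by omega)).ne'
    · simp only [List.mem_singleton] at h2
      subst h2
      simp only [hg, ne_eq, neg_eq_zero, Int.natCast_eq_zero]
      exact (Nat.choose_pos (by omega)).ne'

lemma step_mrow (k : Nat) (hk : 1 ≤ k) :
    mulByY (PySem.Dict.mk (mrow k)) (PySem.Dict.mk (mrow (k-1)))
      = (PySem.Dict.mk (mrow (k+1)), PySem.Dict.mk (mrow k)) := by
  obtain ⟨j, rfl | rfl⟩ := Nat.even_or_odd' k
  · obtain ⟨j', rfl⟩ : ∃ j', j = j'+1 := ⟨j-1, by omega⟩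
    have h2 : mrow (2*(j'+1)-1) = orow j' := by
      rw [show 2*(j'+1)-1 = 2*j'+1 from by omega, mrow_two_mul_add_one]
    have h3 : mrow (2*(j'+1)+1) = orow (j'+1) := mrow_two_mul_add_one _
    rw [mrow_two_mul, h2, h3]
    unfold mulByY
    rw [stepO j']
  · have h2 : mrow (2*j+1-1) = erow j := by rw [show 2*j+1-1 = 2*j from by omega, mrow_two_mul]
    have h3 : mrow (2*j+1+1) = erow (j+1) := by rw [show 2*j+1+1 = 2*(j+1) from by omega, mrow_two_mul]
    rw [mrow_two_mul_add_one, h2, h3]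
    unfold mulByY
    rw [stepE j]

lemma choose_step (M D : Nat) (hDM : D ≤ M) :
    Nat.choose M D * (M+1) * (M-D) = Nat.choose (M+1) (D+2) * ((D+1)*(D+2)) := by
  have h1 : (M+1) * Nat.choose M D = Nat.choose (M+1) (D+1) * (D+1) := by
    simpa using Nat.add_one_mul_choose_eq M D
  have h2 : Nat.choose (M+1) (D+2) * (D+2) = Nat.choose (M+1) (D+1) * (M - D) := by
    have h := Nat.choose_succ_right_eq (M+1) (D+1)
    rwa [show M+1-(D+1) = M-D from by omega] at h
  calc Nat.choose M D * (M+1) * (M-D) = ((M+1) * Nat.choose M D)*(M-D) := by ring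
    _ = (Nat.choose (M+1) (D+1) * (D+1))*(M-D) := by rw [h1]
    _ = (Nat.choose (M+1) (D+1) * (M-D)) * (D+1) := by ring
    _ = (Nat.choose (M+1) (D+2) * (D+2)) * (D+1) := by rw [← h2]
    _ = Nat.choose (M+1) (D+2) * ((D+1)*(D+2)) := by ring

lemma rowAux_spec (k : Nat) : ∀ (t j : Nat) (out : PySem.Dict Int Int),
    t = k/2 + 1 - j →
    (∀ (x : Int), ((k % 2 + 2*j : Nat) : Int) ≤ x → out.contains x = false) →
    rowAux (k : Int) (if k % 2 = 0 then 1 else -1) ((k % 2 + 2*j : Nat) : Int)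
        (((k+1)/2 + j : Nat) : Int) ((Nat.choose ((k+1)/2 + j) (k % 2 + 2*j) : Nat) : Int) out
      = PySem.Dict.mk (out.items ++ (List.range t).map (fun i =>
          (((k % 2 + 2*(j+i) : Nat) : Int),
           (if k % 2 = 0 then 1 else -1) * ((Nat.choose ((k+1)/2 + (j+i)) (k % 2 + 2*(j+i)) : Nat) : Int)))) := by
  intro t
  induction t with
  | zero =>
    intro j out ht hfresh
    rw [rowAux, dif_neg (by push_cast; omega)]
    cases out; simp
  | succ t ih =>
    intro j out ht hfresh
    have hjk : j ≤ k/2 := by omega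
    have hdk : k % 2 + 2*j ≤ k := by omega
    set D := k % 2 + 2*j with hD
    set M := (k+1)/2 + j with hM
    have hDM : D ≤ M := by omega
    rw [rowAux, dif_pos (by exact_mod_cast hdk)]
    -- the new coefficient is the next binomial
    have hc : PySem.Int.floordiv (((Nat.choose M D : Nat) : Int) * (((M:Nat):Int)+1) * (((M:Nat):Int)-((D:Nat):Int)))
        ((((D:Nat):Int)+1) * (((D:Nat):Int)+2))
        = ((Nat.choose (M+1) (D+2) : Nat) : Int) := by
      have e1 : ((Nat.choose M D : Nat) : Int) * (((M:Nat):Int)+1) * (((M:Nat):Int)-((D:Nat):Int))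
          = ((Nat.choose M D * (M+1) * (M-D) : Nat) : Int) := by
        rw [Nat.cast_mul, Nat.cast_mul, Nat.cast_sub hDM]
        push_cast
        ring
      have e2 : (((D:Nat):Int)+1) * (((D:Nat):Int)+2) = (((D+1)*(D+2) : Nat) : Int) := by push_cast; ring
      rw [e1, e2, PySem.Int.floordiv_natCast, choose_step M D hDM,
          Nat.mul_div_cancel _ (by positivity)]
    -- the inserted entry appends
    have hnc : out.contains ((D : Nat) : Int) = false := hfresh _ (le_refl _)
    have hstep := ih (j+1) (out.insert ((D:Nat):Int) ((if k % 2 = 0 then 1 else -1) * ((Nat.choose M D : Nat) : Int)))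
      (by omega)
      (by intro x hx
          rw [PySem.Dict.contains_insert]
          have h1 : (x == ((D:Nat):Int)) = false := by
            simp only [beq_eq_false_iff_ne, ne_eq]
            intro h; subst h
            have : ((k % 2 + 2*(j+1) : Nat) : Int) ≤ ((D:Nat):Int) := hx
            have := by exact_mod_cast this
            omega
          rw [h1, hfresh x (by push_cast at hx ⊢; omega)]
          rfl)
    -- align the arguments of the recursive call with hstep
    have ed : ((D:Nat):Int) + 2 = ((k % 2 + 2*(j+1) : Nat) : Int) := by push_cast; omega
    have em : (((M:Nat)):Int) + 1 = (((k+1)/2 + (j+1) : Nat) : Int) := by push_cast; omega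
    have ec : ((Nat.choose (M+1) (D+2) : Nat) : Int) = ((Nat.choose ((k+1)/2 + (j+1)) (k % 2 + 2*(j+1)) : Nat) : Int) := by
      have e3 : M+1 = (k+1)/2 + (j+1) := by omega
      have e4 : D+2 = k % 2 + 2*(j+1) := by omega
      rw [e3, e4]
    rw [hc, ed, em, ec, hstep]
    -- list algebra
    congr 1
    rw [PySem.Dict.items_insert, hnc]
    simp only [Bool.false_eq_true, if_false, List.append_assoc]
    congr 1
    rw [List.range_succ_eq_map, List.map_cons, List.map_map, List.singleton_append]
    refine congrArg₂ (· :: ·) ?_ ?_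
    · simp [hD, hM]
    · apply List.map_congr_left
      intro i _
      simp only [Function.comp]
      rw [show j + 1 + i = j + (i+1) from by omega]

lemma pyRow_spec (k : Nat) : pyRow (k : Int) = PySem.Dict.mk (mrow k) := by
  have hmod : PySem.Int.mod (k : Int) 2 = ((k % 2 : Nat) : Int) := by
    exact_mod_cast PySem.Int.mod_natCast k 2
  have hm : PySem.Int.floordiv ((k : Int) + ((k % 2 : Nat) : Int)) 2 = (((k+1)/2 : Nat) : Int) := by
    have e1 : (k : Int) + ((k % 2 : Nat) : Int) = ((k + k % 2 : Nat) : Int) := by push_cast; ring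
    rw [e1]
    have e2 := PySem.Int.floordiv_natCast (k + k % 2) 2
    rw [show ((2:Nat):Int) = (2:Int) from rfl] at e2
    rw [e2]
    congr 1
    omega
  have hsign : (if PySem.Int.mod (k : Int) 2 ≠ 0 then (-1 : Int) else 1) = (if k % 2 = 0 then 1 else -1) := by
    rw [hmod]
    rcases Nat.even_or_odd k with h | h
    · rw [if_neg (by simp [Nat.even_iff.mp h]), if_pos (Nat.even_iff.mp h)]
    · rw [if_pos (by simp [Nat.odd_iff.mp h]), if_neg (by simp [Nat.odd_iff.mp h])]
  have hc : (if ((k % 2 : Nat) : Int) ≠ 0 then (((k+1)/2 : Nat) : Int) else 1)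
      = ((Nat.choose ((k+1)/2 + 0) (k % 2 + 2*0) : Nat) : Int) := by
    rcases Nat.even_or_odd k with h | h
    · rw [if_neg (by simp [Nat.even_iff.mp h])]
      simp [Nat.even_iff.mp h]
    · rw [if_pos (by simp [Nat.odd_iff.mp h])]
      simp [Nat.odd_iff.mp h, Nat.choose_one_right]
  have hspec := rowAux_spec k (k/2 + 1) 0 PySem.Dict.empty (by omega)
    (fun x _ => PySem.Dict.contains_empty x)
  show rowAux (k:Int) _ _ _ _ _ = _
  rw [hsign, hmod, hm, hc]
  rw [show ((k % 2 : Nat) : Int) = ((k % 2 + 2*0 : Nat) : Int) from by norm_num,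
      show (((k+1)/2 : Nat) : Int) = (((k+1)/2 + 0 : Nat) : Int) from by norm_num]
  rw [hspec]
  congr 1
  show (List.range (k/2+1)).map _ = mrow k
  rcases Nat.even_or_odd' k with ⟨j, rfl | rfl⟩
  · rw [mrow_two_mul, erow, show (2*j)/2 = j from by omega]
    apply List.map_congr_left
    intro i _
    have h2 : (2*j) % 2 = 0 := by omega
    rw [if_pos h2]
    apply Prod.ext
    · dsimp only
      congr 1
      omega
    · dsimp only
      rw [one_mul]
      congr 2
      · omega
      · omega
  · rw [mrow_two_mul_add_one, orow]
    rw [show (2*j+1)/2 = j from by omega]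
    apply List.map_congr_left
    intro i _
    have h2 : (2*j+1) % 2 = 1 := by omega
    rw [h2, if_neg (by omega)]
    apply Prod.ext
    · dsimp only
      congr 1
      omega
    · dsimp only
      rw [neg_one_mul]
      have e1 : (2*j+1+1)/2 + (0+i) = j+1+i := by omega
      have e2 : 1 + 2*(0+i) = 2*i+1 := by omega
      rw [e1, e2]

lemma foldA (m : Nat) (hm : 1 ≤ m) :
    ((PySem.List.pyRange 2 ((m : Int)+1) 1).foldl
      (fun (st : PySem.Dict Int Int × PySem.Dict Int Int ×
                 List (PySem.Dict Int Int × PySem.Dict Int Int)) _ =>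
        let AB := mulByY st.1 st.2.1
        (AB.1, AB.2, st.2.2 ++ [AB]))
      (PySem.Dict.mk (mrow 1), PySem.Dict.mk (mrow 0), tblD 1))
    = (PySem.Dict.mk (mrow m), PySem.Dict.mk (mrow (m-1)), tblD m) := by
  induction m, hm using Nat.le_induction with
  | base =>
    rw [show (((1:Nat) : Int)+1) = 2 from by norm_num, PySem.List.pyRange_one_eq_nil (by omega)]
    rfl
  | succ m hm ih =>
    have hcast : (((m+1 : Nat)) : Int) + 1 = ((m : Int) + 1) + 1 := by push_cast; ring
    rw [hcast, PySem.List.pyRange_one_succ_right (by omega), List.foldl_append, ih]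
    simp only [List.foldl_cons, List.foldl_nil]
    rw [step_mrow m hm, tblD_succ m]
    simp

lemma foldB (m : Nat) (hm : 1 ≤ m) :
    ((PySem.List.pyRange 2 ((m : Int)+1) 1).foldl
      (fun (st : PySem.Dict Int Int ×
                 List (PySem.Dict Int Int × PySem.Dict Int Int)) k =>
        let cur := pyRow k
        (cur, st.2 ++ [(cur, st.1)]))
      (PySem.Dict.mk (mrow 1), tblD 1))
    = (PySem.Dict.mk (mrow m), tblD m) := by
  induction m, hm using Nat.le_induction with
  | base =>
    rw [show (((1:Nat) : Int)+1) = 2 from by norm_num, PySem.List.pyRange_one_eq_nil (by omega)]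
    rfl
  | succ m hm ih =>
    have hcast : (((m+1 : Nat)) : Int) + 1 = ((m : Int) + 1) + 1 := by push_cast; ring
    rw [hcast, PySem.List.pyRange_one_succ_right (by omega), List.foldl_append, ih]
    simp only [List.foldl_cons, List.foldl_nil]
    rw [show ((m : Int) + 1) = (((m+1 : Nat)) : Int) from by push_cast; ring, pyRow_spec (m+1), tblD_succ m]

lemma mrow_one : mrow 1 = [((1:Int), (-1:Int))] := by decide
lemma mrow_zero : mrow 0 = [((0:Int), (1:Int))] := by decide
lemma tblD_one : tblD 1 = [(PySem.Dict.mk [((0:Int),(1:Int))], PySem.Dict.empty),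
    (PySem.Dict.mk [((1:Int),(-1:Int))], PySem.Dict.mk [((0:Int),(1:Int))])] := by decide

-- ===== VERDICT (by name: the statement is the Claim_ definition above) =====
theorem power_table_y_py_spec : Claim_equal_power_table_y_py := by
  intro n _
  unfold Spec_power_table_y_py
  by_cases h0 : n = 0
  · subst h0; rfl
  · rcases Int.lt_or_le n 0 with hneg | hpos
    · unfold power_table_y_py power_table_y_py_alt
      rw [if_neg h0, if_neg h0, PySem.List.pyRange_one_eq_nil (by omega)]
      rfl
    · have hm : 1 ≤ n := by omega
      obtain ⟨m, rfl⟩ : ∃ m : Nat, n = (m : Int) := ⟨n.toNat, (Int.toNat_of_nonneg hpos).symm⟩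
      have hm1 : 1 ≤ m := by exact_mod_cast hm
      unfold power_table_y_py power_table_y_py_alt
      rw [if_neg h0, if_neg h0]
      simp only []
      rw [show PySem.Dict.mk [((1:Int),(-1:Int))] = PySem.Dict.mk (mrow 1) from by rw [mrow_one],
          show PySem.Dict.mk [((0:Int),(1:Int))] = PySem.Dict.mk (mrow 0) from by rw [mrow_zero]]
      rw [show ([(PySem.Dict.mk (mrow 0), PySem.Dict.empty)] ++
            [(PySem.Dict.mk (mrow 1), PySem.Dict.mk (mrow 0))]) = tblD 1 from by
          rw [tblD_one, mrow_one, mrow_zero]; rfl]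
      rw [foldA m hm1, foldB m hm1]
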